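-- pv_equiv track=rewrite | github.com/Taoge123/OptimizedLeetcode | LeetcodeNew/python/LC_691.py | findNextState
-- ===== SOURCE A (Python) =====
-- def findNextState(state, sticker, target):
--     n = len(target)
--     for s in sticker:
--         for k in range(n):
--             # 如果state的第k位是空的, char可以填补上
--             if ((state >> k) & 1) == 0 and target[k] == s:
--                 state += (1 << k)
--                 # state |= (1 << k)
--                 break
--     return state
-- ===== SOURCE B (Python) =====
-- def findNextState(state, sticker, target):
--     counts = {}
--     for ch in sticker:
--         counts[ch] = counts.get(ch, 0) + 1
--     seen = {}
--     add = 0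
--     for k, c in enumerate(target):
--         if (state >> k) & 1 == 0:
--             s = seen.get(c, 0) + 1
--             seen[c] = s
--             if s <= counts.get(c, 0):
--                 add += 1 << k
--     return state + add
-- ===== Notes on version B (the rewrite author's own statement) =====
-- stated objective: faster
-- what changed: Instead of rescanning the target once per sticker character with a break after the first fill, B counts the sticker's characters once, then makes a single pass over the target that tracks per-character how many empty matching positions it has seen and accumulates the newly set bits as a separate sum added to state at the end.
import Mathlib
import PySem

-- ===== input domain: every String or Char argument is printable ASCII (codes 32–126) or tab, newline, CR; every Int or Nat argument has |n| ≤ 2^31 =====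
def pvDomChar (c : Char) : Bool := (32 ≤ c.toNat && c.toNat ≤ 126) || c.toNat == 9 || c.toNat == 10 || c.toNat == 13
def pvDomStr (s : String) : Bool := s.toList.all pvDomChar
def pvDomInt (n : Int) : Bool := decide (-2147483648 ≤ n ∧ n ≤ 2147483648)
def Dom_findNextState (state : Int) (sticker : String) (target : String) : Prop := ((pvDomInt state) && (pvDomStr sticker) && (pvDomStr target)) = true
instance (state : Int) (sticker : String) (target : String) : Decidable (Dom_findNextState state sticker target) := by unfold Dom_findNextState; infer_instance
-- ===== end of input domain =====

-- B replaces A's per-sticker-character rescan of the target by one counting pass over the sticker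
-- followed by one pass over the target positions that accumulates the newly set bits as a separate
-- sum (state is never re-tested against bits set during the scan).

-- ===== PORT A =====
-- inner loop 'for k in range(n): if ((state >> k) & 1) == 0 and target[k] == s: state += (1 << k); break'
-- transcribed as structural recursion over target's characters paired with their index k
def fillFirstA (s : Char) : Int → Nat → List Char → Int
  | st, _, [] => st
  | st, k, c :: cs =>
      if PySem.Int.band (st >>> k) 1 = 0 ∧ c = s then st + ((1 : Int) <<< k)
      else fillFirstA s st (k + 1) cs

def findNextState (state : Int) (sticker : String) (target : String) : Int :=
  sticker.toList.foldl (fun st s => fillFirstA s st 0 target.toList) state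

-- ===== PORT B =====
-- 'for ch in sticker: counts[ch] = counts.get(ch, 0) + 1'
def countsB (sticker : List Char) : PySem.Dict Char Int :=
  sticker.foldl (fun d ch => d.insert ch (d.getD ch 0 + 1)) PySem.Dict.empty

-- 'for k, c in enumerate(target): if (state >> k) & 1 == 0: s = seen.get(c,0)+1; seen[c] = s;
--      if s <= counts.get(c,0): add += 1 << k'  — recursion over target returning the accumulated add
def addB (state : Int) (counts : PySem.Dict Char Int) : PySem.Dict Char Int → Nat → List Char → Int
  | _, _, [] => 0
  | seen, k, c :: cs =>
      if PySem.Int.band (state >>> k) 1 = 0 then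
        if seen.getD c 0 + 1 ≤ counts.getD c 0 then
          ((1 : Int) <<< k) + addB state counts (seen.insert c (seen.getD c 0 + 1)) (k + 1) cs
        else addB state counts (seen.insert c (seen.getD c 0 + 1)) (k + 1) cs
      else addB state counts seen (k + 1) cs

def findNextState_alt (state : Int) (sticker : String) (target : String) : Int :=
  state + addB state (countsB sticker.toList) PySem.Dict.empty 0 target.toList

-- ===== PRECONDITION & SPEC =====
def Spec_findNextState (state : Int) (sticker : String) (target : String) (out : Int) : Prop := out = findNextState_alt state sticker target
instance (state : Int) (sticker : String) (target : String) (out : Int) : Decidable (Spec_findNextState state sticker target out) := by unfold Spec_findNextState; infer_instance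

-- ===== CLAIM (what is proved, stated in full; the proofs are below) =====
def Claim_equal_findNextState : Prop := ∀ (state : Int) (sticker : String) (target : String), Dom_findNextState state sticker target → Spec_findNextState state sticker target (findNextState state sticker target)

-- ===== LEMMAS AND PROOFS =====

-- proof-side abstraction: a state-threading scan with the remaining-count function f
def updF (f : Char → Int) (c : Char) (v : Int) : Char → Int := fun x => if x = c then v else f x

def scanF : Int → (Char → Int) → Nat → List Char → Int
  | st, _, _, [] => st
  | st, f, k, c :: cs =>
      if PySem.Int.band (st >>> k) 1 = 0 ∧ f c > 0 then
        scanF (st + ((1 : Int) <<< k)) (updF f c (f c - 1)) (k + 1) cs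
      else scanF st f (k + 1) cs

-- the same scan, accumulating the set bits as a sum against the FIXED state st
def sumF (st : Int) : (Char → Int) → Nat → List Char → Int
  | _, _, [] => 0
  | f, k, c :: cs =>
      if PySem.Int.band (st >>> k) 1 = 0 ∧ f c > 0 then
        ((1 : Int) <<< k) + sumF st (updF f c (f c - 1)) (k + 1) cs
      else sumF st f (k + 1) cs

-- B's scan with its two dicts replaced by their lookup functions
def goF (st : Int) (counts : Char → Int) : (Char → Int) → Nat → List Char → Int
  | _, _, [] => 0
  | seen, k, c :: cs =>
      if PySem.Int.band (st >>> k) 1 = 0 then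
        if seen c + 1 ≤ counts c then
          ((1 : Int) <<< k) + goF st counts (updF seen c (seen c + 1)) (k + 1) cs
        else goF st counts (updF seen c (seen c + 1)) (k + 1) cs
      else goF st counts seen (k + 1) cs

-- the bit test, in arithmetic form
lemma band_shift_eq (st : Int) (k : Nat) : PySem.Int.band (st >>> k) 1 = st / 2 ^ k % 2 := by
  rw [PySem.Int.band_one, Int.shiftRight_eq_div_pow,
    PySem.Int.mod_eq_emod_of_pos (by norm_num)]
  push_cast; ring

lemma one_shl (k : Nat) : (1 : Int) <<< k = 2 ^ k := by simp [Int.shiftLeft_eq]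

-- adding 2^k to a number whose bit k is 0 sets bit k …
lemma bit_set (st : Int) (k : Nat) (h : st / 2 ^ k % 2 = 0) :
    (st + 2 ^ k) / 2 ^ k % 2 = 1 := by
  have h2 : (2:Int)^k ≠ 0 := by positivity
  have e : (st + 2 ^ k) / 2 ^ k = st / 2 ^ k + 1 := by
    simpa using Int.add_mul_ediv_right st 1 h2
  rw [e]; omega

-- … and leaves every other bit unchanged
lemma bit_other (st : Int) (k j : Nat) (hjk : j ≠ k) (h : st / 2 ^ k % 2 = 0) :
    (st + 2 ^ k) / 2 ^ j % 2 = st / 2 ^ j % 2 := by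
  rcases Nat.lt_or_ge j k with hj | hj
  · obtain ⟨d, rfl⟩ : ∃ d, k = j + (d + 1) := ⟨k - j - 1, by omega⟩
    have h2 : (2:Int)^j ≠ 0 := by positivity
    have e : (st + 2 ^ (j + (d + 1))) / 2 ^ j = st / 2 ^ j + 2 ^ (d + 1) := by
      have := Int.add_mul_ediv_right st (2 ^ (d+1)) h2
      rw [← this]; ring_nf
    rw [e]
    have e2 : st / 2 ^ j + 2 ^ (d + 1) = st / 2 ^ j + 2 * 2 ^ d := by ring
    rw [e2]
    omega
  · obtain ⟨e, rfl⟩ : ∃ e, j = (k + 1) + e := ⟨j - k - 1, by omega⟩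
    set q := st / 2 ^ (k + 1) with hq
    set r := st % 2 ^ (k + 1) with hr
    have hpos : (0:Int) < 2 ^ (k+1) := by positivity
    have hdecomp : st = 2 ^ (k+1) * q + r := (Int.mul_ediv_add_emod st (2^(k+1))).symm
    have hr0 : 0 ≤ r := Int.emod_nonneg st (by positivity)
    have hr1 : r < 2 ^ (k+1) := Int.emod_lt_of_pos st hpos
    have hkpos : (0:Int) < 2 ^ k := by positivity
    have hdivk : st / 2 ^ k = r / 2 ^ k + 2 * q := by
      have e1 : st = r + (2 * q) * 2 ^ k := by rw [hdecomp]; ring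
      rw [e1, Int.add_mul_ediv_right _ _ (by positivity : (2:Int)^k ≠ 0)]
    have hrk2 : r / 2 ^ k < 2 := Int.ediv_lt_of_lt_mul hkpos (by
      calc r < 2 ^ (k+1) := hr1
        _ = 2 * 2 ^ k := by ring)
    have hrk0 : 0 ≤ r / 2 ^ k := Int.ediv_nonneg hr0 (le_of_lt hkpos)
    have hbit : r / 2 ^ k = 0 := by rw [hdivk] at h; omega
    have hrlt : r < 2 ^ k := by
      by_contra hcon
      have : 1 ≤ r / 2 ^ k := (Int.le_ediv_iff_mul_le hkpos).mpr (by omega)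
      omega
    have q2 : (st + 2 ^ k) / 2 ^ (k+1) = q := by
      have e1 : st + 2 ^ k = (r + 2 ^ k) + q * 2 ^ (k+1) := by rw [hdecomp]; ring
      rw [e1, Int.add_mul_ediv_right _ _ (ne_of_gt hpos),
        Int.ediv_eq_zero_of_lt (by omega) (by rw [pow_succ]; omega)]
      omega
    have div1 : st / 2 ^ (k + 1 + e) = q / 2 ^ e := by
      rw [pow_add, ← Int.ediv_ediv_of_nonneg (le_of_lt hpos)]
    have div2 : (st + 2 ^ k) / 2 ^ (k + 1 + e) = q / 2 ^ e := by
      rw [pow_add, ← Int.ediv_ediv_of_nonneg (le_of_lt hpos), q2]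
    rw [div1, div2]

-- A's inner scan starting at position k leaves every bit below k unchanged
lemma bit_fill_lt (s : Char) (cs : List Char) : ∀ (st : Int) (k m : Nat), m < k →
    fillFirstA s st k cs / 2 ^ m % 2 = st / 2 ^ m % 2 := by
  induction cs with
  | nil => intro st k m _; rfl
  | cons c cs ih =>
    intro st k m hm
    rw [fillFirstA]
    split_ifs with hc
    · rw [one_shl]
      exact bit_other st k m (by omega) (by rw [← band_shift_eq]; exact hc.1)
    · exact ih st (k+1) m (by omega)

-- A's inner scan commutes with setting an empty bit below its start position
lemma fill_add_pow (s : Char) (cs : List Char) : ∀ (st : Int) (k m : Nat), m < k →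
    st / 2 ^ m % 2 = 0 →
    fillFirstA s (st + 2 ^ m) k cs = fillFirstA s st k cs + 2 ^ m := by
  induction cs with
  | nil => intro st k m _ _; rfl
  | cons c cs ih =>
    intro st k m hm h0
    rw [fillFirstA, fillFirstA]
    have hb : PySem.Int.band ((st + 2 ^ m) >>> k) 1 = PySem.Int.band (st >>> k) 1 := by
      rw [band_shift_eq, band_shift_eq]
      exact bit_other st m k (by omega) h0
    rw [hb]
    split_ifs with hc
    · ring
    · exact ih st (k+1) m (by omega) h0

-- key step: one extra copy of s in the counts = one A-style fill of s done first
lemma key_lemma (s : Char) (cs : List Char) : ∀ (st : Int) (k : Nat) (f : Char → Int), 0 ≤ f s →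
    scanF st (updF f s (f s + 1)) k cs = scanF (fillFirstA s st k cs) f k cs := by
  induction cs with
  | nil => intro st k f _; rfl
  | cons c cs ih =>
    intro st k f hf
    by_cases hcs : c = s
    · subst hcs
      by_cases hb : PySem.Int.band (st >>> k) 1 = 0
      · -- first empty match: both fill position k
        rw [fillFirstA, if_pos ⟨hb, rfl⟩]
        rw [scanF, if_pos ⟨hb, by simp [updF]; omega⟩]
        rw [scanF, if_neg]
        · congr 1
          funext x
          by_cases hx : x = c
          · subst hx; simp [updF]
          · simp [updF, hx]
        · rw [one_shl, band_shift_eq,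
            bit_set st k (by rw [← band_shift_eq]; exact hb)]
          exact fun hcon => one_ne_zero hcon.1
      · -- bit occupied: both skip position k
        rw [fillFirstA, if_neg (fun hcon => hb hcon.1)]
        rw [scanF, if_neg (fun hcon => hb hcon.1)]
        rw [scanF, if_neg]
        · exact ih st (k+1) f hf
        · intro hcon
          apply hb
          rw [band_shift_eq] at hcon ⊢
          rw [bit_fill_lt c cs st (k+1) k (by omega)] at hcon
          exact hcon.1
    · -- c ≠ s : A's fill skips position k in the head step
      have hsc : ¬ s = c := fun h => hcs h.symm
      have hfc : updF f s (f s + 1) c = f c := by simp [updF, hcs]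
      rw [fillFirstA, if_neg (fun hcon => hcs hcon.2)]
      by_cases hb : PySem.Int.band (st >>> k) 1 = 0
      · have hbR : PySem.Int.band (fillFirstA s st (k+1) cs >>> k) 1 = 0 := by
          rw [band_shift_eq, bit_fill_lt s cs st (k+1) k (by omega), ← band_shift_eq]
          exact hb
        by_cases hcnt : f c > 0
        · rw [scanF, if_pos ⟨hb, by rw [hfc]; exact hcnt⟩]
          rw [scanF, if_pos ⟨hbR, hcnt⟩]
          have hfun : updF (updF f s (f s + 1)) c (updF f s (f s + 1) c - 1)
              = updF (updF f c (f c - 1)) s (updF f c (f c - 1) s + 1) := by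
            funext x
            by_cases hx1 : x = c
            · subst hx1; simp [updF, hcs]
            · by_cases hx2 : x = s
              · subst hx2; simp [updF, hsc]
              · simp [updF, hx1, hx2]
          rw [hfun]
          rw [ih (st + ((1:Int) <<< k)) (k+1) (updF f c (f c - 1))
              (by simp [updF, hsc]; omega)]
          congr 1
          rw [one_shl,
            fill_add_pow s cs st (k+1) k (by omega) (by rw [← band_shift_eq]; exact hb)]
        · rw [scanF, if_neg (by rw [hfc]; exact fun hcon => hcnt hcon.2)]
          rw [scanF, if_neg (fun hcon => hcnt hcon.2)]
          exact ih st (k+1) f hf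
      · have hbR : ¬ PySem.Int.band (fillFirstA s st (k+1) cs >>> k) 1 = 0 := by
          rw [band_shift_eq, bit_fill_lt s cs st (k+1) k (by omega), ← band_shift_eq]
          exact hb
        rw [scanF, if_neg (fun hcon => hb hcon.1)]
        rw [scanF, if_neg (fun hcon => hbR hcon.1)]
        exact ih st (k+1) f hf

lemma count_fun (s : Char) (ss : List Char) :
    (fun c => ((s :: ss).count c : Int))
      = updF (fun c => (ss.count c : Int)) s ((ss.count s : Int) + 1) := by
  funext x
  simp only [updF, List.count_cons]
  by_cases hx : x = s
  · simp [hx]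
  · simp [hx]
    exact fun h => hx h.symm

lemma scanF_zero (cs : List Char) : ∀ (st : Int) (k : Nat), scanF st (fun _ => (0:Int)) k cs = st := by
  induction cs with
  | nil => intro st k; rfl
  | cons c cs ih => intro st k; rw [scanF, if_neg (by omega)]; exact ih st (k+1)

lemma main_lemma (ts : List Char) (ss : List Char) : ∀ st : Int,
    scanF st (fun c => (ss.count c : Int)) 0 ts
      = ss.foldl (fun st s => fillFirstA s st 0 ts) st := by
  induction ss with
  | nil =>
    intro st
    have h0 : (fun c => (([] : List Char).count c : Int)) = fun _ => (0 : Int) := by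
      funext c; simp
    rw [h0]
    simp only [List.foldl_nil]
    exact scanF_zero ts st 0
  | cons s ss ih =>
    intro st
    rw [count_fun, key_lemma s ts st 0 _ (by positivity), List.foldl_cons, ih]

-- sumF only reads bits ≥ k of its fixed state
lemma sumF_congr_bits (cs : List Char) : ∀ (st st' : Int) (f : Char → Int) (k : Nat),
    (∀ j, k ≤ j → st' / 2 ^ j % 2 = st / 2 ^ j % 2) → sumF st' f k cs = sumF st f k cs := by
  induction cs with
  | nil => intro st st' f k _; rfl
  | cons c cs ih =>
    intro st st' f k h
    rw [sumF, sumF, band_shift_eq, band_shift_eq, h k (le_refl k)]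
    split_ifs with hc
    · rw [ih st st' _ (k+1) (fun j hj => h j (by omega))]
    · exact ih st st' f (k+1) (fun j hj => h j (by omega))

-- the state-threading scan equals the fixed-state bit sum
lemma scanF_eq_add_sumF (cs : List Char) : ∀ (st : Int) (f : Char → Int) (k : Nat),
    scanF st f k cs = st + sumF st f k cs := by
  induction cs with
  | nil => intro st f k; simp [scanF, sumF]
  | cons c cs ih =>
    intro st f k
    rw [scanF, sumF]
    split_ifs with hc
    · rw [ih]
      have hb0 : st / 2 ^ k % 2 = 0 := by rw [← band_shift_eq]; exact hc.1
      have hcongr : sumF (st + ((1:Int) <<< k)) (updF f c (f c - 1)) (k+1) cs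
          = sumF st (updF f c (f c - 1)) (k+1) cs := by
        apply sumF_congr_bits
        intro j hj
        rw [one_shl]
        exact bit_other st k j (by omega) hb0
      rw [hcongr]; ring
    · exact ih st f (k+1)

-- B's dict scan is goF of the dicts' lookup functions
lemma addB_eq_goF (cs : List Char) : ∀ (st : Int) (counts seen : PySem.Dict Char Int) (k : Nat),
    addB st counts seen k cs
      = goF st (fun c => counts.getD c 0) (fun c => seen.getD c 0) k cs := by
  induction cs with
  | nil => intro st counts seen k; rfl
  | cons c cs ih =>
    intro st counts seen k
    rw [addB, goF]
    have hupd : (fun x => (seen.insert c (seen.getD c 0 + 1)).getD x 0)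
        = updF (fun x => seen.getD x 0) c (seen.getD c 0 + 1) := by
      funext x; rw [PySem.Dict.getD_insert]; simp [updF]
    split_ifs with h1 h2
    · rw [ih, hupd]
    · rw [ih, hupd]
    · exact ih st counts seen (k+1)

-- goF with a seen-counter equals sumF with the remaining counts
lemma updF_nonneg (seen : Char → Int) (c : Char) (hs : ∀ x, 0 ≤ seen x) :
    ∀ x, 0 ≤ updF seen c (seen c + 1) x := by
  intro x
  simp only [updF]
  split_ifs with hx
  · have := hs c; omega
  · exact hs x

lemma goF_eq_sumF (cs : List Char) : ∀ (st : Int) (counts seen : Char → Int) (k : Nat),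
    (∀ c, 0 ≤ seen c) → (∀ c, 0 ≤ counts c) →
    goF st counts seen k cs
      = sumF st (fun c => counts c - min (seen c) (counts c)) k cs := by
  induction cs with
  | nil => intro st counts seen k _ _; rfl
  | cons c cs ih =>
    intro st counts seen k hs hc
    rw [goF, sumF]
    by_cases hb : PySem.Int.band (st >>> k) 1 = 0
    · rw [if_pos hb]
      by_cases hle : seen c + 1 ≤ counts c
      · rw [if_pos hle,
          if_pos (⟨hb, by show counts c - min (seen c) (counts c) > 0; have := hs c; omega⟩ :
            PySem.Int.band (st >>> k) 1 = 0 ∧ (fun c => counts c - min (seen c) (counts c)) c > 0)]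
        rw [ih st counts (updF seen c (seen c + 1)) (k+1) (updF_nonneg seen c hs) hc]
        have hfun : (fun x => counts x - min (updF seen c (seen c + 1) x) (counts x))
            = updF (fun x => counts x - min (seen x) (counts x)) c
                ((fun x => counts x - min (seen x) (counts x)) c - 1) := by
          funext x
          by_cases hx : x = c
          · subst hx
            simp only [updF]
            simp only [min_def]
            split_ifs <;> omega
          · simp [updF, hx]
        rw [hfun]
      · rw [if_neg hle,
          if_neg (fun hcon => by
            have h2 : counts c - min (seen c) (counts c) > 0 := hcon.2
            have := hs c
            omega)]
        rw [ih st counts (updF seen c (seen c + 1)) (k+1) (updF_nonneg seen c hs) hc]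
        have hfun : (fun x => counts x - min (updF seen c (seen c + 1) x) (counts x))
            = fun x => counts x - min (seen x) (counts x) := by
          funext x
          by_cases hx : x = c
          · subst hx
            simp only [updF]
            simp only [min_def]
            split_ifs <;> omega
          · simp [updF, hx]
        rw [hfun]
    · rw [if_neg hb, if_neg (fun hcon => hb hcon.1)]
      exact ih st counts seen (k+1) hs hc

-- ===== VERDICT (by name: the statement is the Claim_ definition above) =====
theorem findNextState_spec : Claim_equal_findNextState := by
  intro state sticker target _
  unfold Spec_findNextState findNextState findNextState_alt
  rw [addB_eq_goF]
  unfold countsB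
  rw [PySem.Dict.foldl_insert_getD_add_one_eq_counter]
  have hcounts : (fun c => (PySem.Dict.counter sticker.toList).getD c 0)
      = fun c => (sticker.toList.count c : Int) := by
    funext c; exact PySem.Dict.getD_counter _ _
  have hseen : (fun c => (PySem.Dict.empty : PySem.Dict Char Int).getD c 0)
      = fun _ => (0 : Int) := by
    funext c; exact PySem.Dict.getD_empty _ _
  rw [hcounts, hseen,
    goF_eq_sumF target.toList state _ _ 0 (fun _ => le_refl 0) (fun c => by positivity)]
  have hmin : (fun c => (fun c => (sticker.toList.count c : Int)) c - min ((fun _ => (0:Int)) c) ((fun c => (sticker.toList.count c : Int)) c))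
      = fun c => (sticker.toList.count c : Int) := by
    funext c
    show (sticker.toList.count c : Int) - min 0 (sticker.toList.count c : Int) = _
    have : (0:Int) ≤ (sticker.toList.count c : Int) := by positivity
    omega
  rw [hmin, ← scanF_eq_add_sumF, main_lemma]
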